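-- pv_equiv track=rewrite | github.com/bmdavll/transform | transform.py | complementList
-- ===== SOURCE A (Python) =====
-- def complementList(ords, length):
--     list = []
--     ords = set(ords)
--     i = 0
--     while len(list) < length:
--         if i not in ords:
--             list.append(i)
--         i += 1
--     return list
-- ===== SOURCE B (Python) =====
-- def complementList(ords, length):
--     s = set(ords)
--     n = max(length, 0)
--     return [i for i in range(n + len(s)) if i not in s][:n]
-- ===== Notes on version B (the rewrite author's own statement) =====
-- stated objective: alternative
-- what changed: Replaces the unbounded while-loop that re-checks the output length each iteration by a precomputed bound length+len(set): a filtered comprehension over a fixed range, sliced to the first length elements.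
import Mathlib
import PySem

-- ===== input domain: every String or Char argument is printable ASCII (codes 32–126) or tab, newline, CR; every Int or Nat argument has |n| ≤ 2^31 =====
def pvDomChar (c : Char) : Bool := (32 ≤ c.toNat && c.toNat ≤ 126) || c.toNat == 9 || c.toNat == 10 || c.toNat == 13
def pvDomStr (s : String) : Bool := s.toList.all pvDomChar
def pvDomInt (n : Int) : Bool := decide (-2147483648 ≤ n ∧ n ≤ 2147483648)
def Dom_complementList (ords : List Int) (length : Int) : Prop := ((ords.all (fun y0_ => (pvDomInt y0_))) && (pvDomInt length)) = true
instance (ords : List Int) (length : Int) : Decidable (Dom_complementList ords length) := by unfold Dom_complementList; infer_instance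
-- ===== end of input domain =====

-- B replaces A's unbounded while loop (checking the output length each turn) by a
-- precomputed bounded range, a filter, and a slice; same cost, different decomposition.


-- ===== PORT A =====
-- A's while loop, step for step; the fuel argument only makes the loop total
-- (length.toNat + |set(ords)| iterations provably suffice, see the lemmas below).
def complementListLoop (s : PySem.Set Int) (length : Int) : Nat → Int → List Int → List Int
  | 0, _, acc => acc
  | fuel + 1, i, acc =>
    if (acc.length : Int) < length then
      if PySem.Set.contains s i then
        complementListLoop s length fuel (i + 1) acc
      else
        complementListLoop s length fuel (i + 1) (acc ++ [i])
    else acc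

def complementList (ords : List Int) (length : Int) : List Int :=
  let s := PySem.Set.ofList ords
  complementListLoop s length (length.toNat + s.length) 0 []

-- ===== PORT B =====
def complementList_alt (ords : List Int) (length : Int) : List Int :=
  let s := PySem.Set.ofList ords
  let n := max length 0
  (((PySem.List.pyRange 0 (n + s.length) 1).filter (fun i => !PySem.Set.contains s i)).take n.toNat)

-- ===== PRECONDITION & SPEC =====
def Spec_complementList (ords : List Int) (length : Int) (out : List Int) : Prop := out = complementList_alt ords length
instance (ords : List Int) (length : Int) (out : List Int) : Decidable (Spec_complementList ords length out) := by unfold Spec_complementList; infer_instance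

-- ===== CLAIM (what is proved, stated in full; the proofs are below) =====
def Claim_equal_complementList : Prop := ∀ (ords : List Int) (length : Int), Dom_complementList ords length → Spec_complementList ords length (complementList ords length)

-- ===== LEMMAS AND PROOFS =====

-- The loop, given enough non-excluded numbers in the next `fuel` integers, returns
-- acc followed by the first (length - len(acc)) of them.
theorem complementListLoop_eq (s : PySem.Set Int) (length : Int) :
    ∀ (fuel : Nat) (i : Int) (acc : List Int),
      length.toNat - acc.length ≤
        ((PySem.List.pyRange i (i + fuel) 1).filter (fun j => !PySem.Set.contains s j)).length →
      complementListLoop s length fuel i acc =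
        acc ++ ((PySem.List.pyRange i (i + fuel) 1).filter
            (fun j => !PySem.Set.contains s j)).take (length.toNat - acc.length) := by
  intro fuel
  induction fuel with
  | zero =>
    intro i acc h
    rw [PySem.List.pyRange_one_eq_nil (by omega)] at h ⊢
    simp at h
    simp [complementListLoop, h]
  | succ fuel ih =>
    intro i acc h
    have hb : i + ((fuel + 1 : Nat) : Int) = (i + 1) + (fuel : Int) := by push_cast; ring
    rw [hb, PySem.List.pyRange_one_cons (by omega), List.filter_cons] at h ⊢
    by_cases hlt : (acc.length : Int) < length
    · have hk : 0 < length.toNat - acc.length := by omega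
      by_cases hc : PySem.Set.contains s i
      · simp only [hc, Bool.not_true, Bool.false_eq_true, if_false] at h ⊢
        rw [complementListLoop, if_pos hlt, if_pos hc]
        exact ih (i + 1) acc h
      · have hc' : PySem.Set.contains s i = false := by simpa using hc
        simp only [hc', Bool.not_false] at h ⊢
        simp only [if_true] at h ⊢
        rw [complementListLoop, if_pos hlt, if_neg hc]
        have h2 := h
        simp only [List.length_cons] at h2
        rw [ih (i + 1) (acc ++ [i])
          (by simp only [List.length_append, List.length_cons, List.length_nil]; omega)]
        have hk' : length.toNat - (acc ++ [i]).length = (length.toNat - acc.length) - 1 := by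
          simp; omega
        rw [hk']
        obtain ⟨m, hm⟩ : ∃ m, length.toNat - acc.length = m + 1 :=
          ⟨_, (Nat.succ_pred_eq_of_pos hk).symm⟩
        rw [hm]
        simp
    · have hz : length.toNat - acc.length = 0 := by omega
      rw [complementListLoop, if_neg hlt, hz]
      simp

-- In any run of distinct integers, at most |s| are members of s.
theorem filter_contains_le (s : PySem.Set Int) (l : List Int) (hl : l.Nodup) :
    (l.filter (fun j => PySem.Set.contains s j)).length ≤ s.length := by
  have hsub : List.Subperm (l.filter (fun j => PySem.Set.contains s j)) s := by
    apply List.subperm_of_subset (hl.filter _)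
    intro x hx
    have := List.of_mem_filter hx
    simpa [PySem.Set.contains] using this
  exact hsub.length_le

theorem enough_room (s : PySem.Set Int) (N : Nat) :
    N ≤ ((PySem.List.pyRange 0 ((N : Int) + s.length) 1).filter
        (fun j => !PySem.Set.contains s j)).length := by
  have hlen : (PySem.List.pyRange 0 ((N : Int) + s.length) 1).length = N + s.length := by
    rw [PySem.List.length_pyRange_one]; omega
  have hsplit := List.length_eq_length_filter_add
    (l := PySem.List.pyRange 0 ((N : Int) + s.length) 1)
    (fun j => PySem.Set.contains s j)
  have hle := filter_contains_le s (PySem.List.pyRange 0 ((N : Int) + s.length) 1)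
    (PySem.List.nodup_pyRange_one _ _)
  omega

-- ===== VERDICT (by name: the statement is the Claim_ definition above) =====
theorem complementList_spec : Claim_equal_complementList := by
  intro ords length _
  unfold Spec_complementList complementList complementList_alt
  set s := PySem.Set.ofList ords with hs
  have hroom := enough_room s length.toNat
  have hN : (0 : Int) + ((length.toNat + s.length : Nat) : Int) = (length.toNat : Int) + s.length := by
    push_cast; ring
  rw [complementListLoop_eq s length (length.toNat + s.length) 0 []
    (by rw [hN]; simp only [List.length_nil, Nat.sub_zero]; exact hroom), hN]
  have hmax : max length 0 = (length.toNat : Int) := by omega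
  rw [List.nil_append, hmax]
  simp only [List.length_nil, Nat.sub_zero, Int.toNat_natCast]
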